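-- pv_equiv track=rewrite | github.com/shiyong5008/CS5001 | practice/hw06-soln.py | mixer
-- ===== SOURCE A (Python) =====
-- def mixer( a, b ):
--     mixed = []
--     while len(a) > 0 and len(b) > 0:
--         mixed.append(a.pop())
--         mixed.append(b.pop())
--
--     while len(a) > 0:
--         mixed.append( a.pop() )
--     while len(b) > 0:
--         mixed.append( b.pop() )
--
--     return mixed
-- ===== SOURCE B (Python) =====
-- def mixer(a, b):
--     # drain both inputs into reversed copies (empties a and b, like A),
--     # then merge the two copies in a single index-driven pass
--     ra = list(reversed(a))
--     rb = list(reversed(b))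
--     a.clear()
--     b.clear()
--     mixed = []
--     i = 0
--     while i < len(ra) and i < len(rb):
--         mixed.append(ra[i])
--         mixed.append(rb[i])
--         i += 1
--     mixed.extend(ra[i:])
--     mixed.extend(rb[i:])
--     return mixed
-- ===== Notes on version B (the rewrite author's own statement) =====
-- stated objective: alternative
-- what changed: B drains both lists into reversed copies first and then merges them in one index-driven pass (interleave while i < both lengths, then extend with the tails), instead of A's three pop-while loops that interleave while draining.
import Mathlib
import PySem

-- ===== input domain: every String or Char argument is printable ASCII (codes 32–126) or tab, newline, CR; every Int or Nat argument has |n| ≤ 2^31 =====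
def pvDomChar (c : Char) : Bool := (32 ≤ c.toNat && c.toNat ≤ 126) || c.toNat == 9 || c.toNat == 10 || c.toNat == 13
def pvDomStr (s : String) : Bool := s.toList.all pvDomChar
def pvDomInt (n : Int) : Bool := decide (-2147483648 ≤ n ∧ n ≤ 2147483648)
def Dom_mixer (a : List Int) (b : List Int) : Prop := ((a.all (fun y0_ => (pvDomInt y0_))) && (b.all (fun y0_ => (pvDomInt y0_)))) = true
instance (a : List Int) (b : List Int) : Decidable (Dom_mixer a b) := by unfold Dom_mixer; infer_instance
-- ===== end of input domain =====

-- B replaces A's interleave-while-draining pop loops by a drain-then-merge decomposition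
-- (reverse both lists first, then one index-driven merge pass); same return value, and both
-- versions leave the argument lists empty (mutation noted; the theorems are about the return value).

-- ===== PORT A =====
-- first while loop: pop from the end of both lists while both are non-empty
def mixerLoopAB : List Int → List Int → List Int → List Int × List Int × List Int
  | a, b, mixed =>
    if h : 0 < a.length ∧ 0 < b.length then
      mixerLoopAB a.dropLast b.dropLast
        (mixed ++ [a.getLast (List.ne_nil_of_length_pos h.1), b.getLast (List.ne_nil_of_length_pos h.2)])
    else (a, b, mixed)
  termination_by a _ _ => a.length
  decreasing_by simp [List.length_dropLast]; omega

-- second/third while loops: drain one list by popping from its end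
def mixerDrain : List Int → List Int → List Int
  | a, mixed =>
    if h : 0 < a.length then
      mixerDrain a.dropLast (mixed ++ [a.getLast (List.ne_nil_of_length_pos h)])
    else mixed
  termination_by a _ => a.length
  decreasing_by simp [List.length_dropLast]; omega

def mixer (a : List Int) (b : List Int) : List Int :=
  let s := mixerLoopAB a b []
  let m2 := mixerDrain s.1 s.2.2
  mixerDrain s.2.1 m2

-- ===== PORT B =====
-- index-driven merge loop over the two reversed copies; returns (mixed, final i)
def mixerAltLoop : List Int → List Int → Nat → List Int → List Int × Nat
  | ra, rb, i, mixed =>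
    if i < ra.length ∧ i < rb.length then
      -- ra[i], rb[i]: the guard ensures both indices are in range (Python would not raise)
      mixerAltLoop ra rb (i + 1) (mixed ++ [ra.getD i 0, rb.getD i 0])
    else (mixed, i)
  termination_by ra _ i _ => ra.length - i
  decreasing_by omega

def mixer_alt (a : List Int) (b : List Int) : List Int :=
  let ra := a.reverse
  let rb := b.reverse
  let p := mixerAltLoop ra rb 0 []
  p.1 ++ ra.drop p.2 ++ rb.drop p.2

-- ===== PRECONDITION & SPEC =====
def Spec_mixer (a : List Int) (b : List Int) (out : List Int) : Prop := out = mixer_alt a b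
instance (a : List Int) (b : List Int) (out : List Int) : Decidable (Spec_mixer a b out) := by unfold Spec_mixer; infer_instance

-- ===== CLAIM (what is proved, stated in full; the proofs are below) =====
def Claim_equal_mixer : Prop := ∀ (a : List Int) (b : List Int), Dom_mixer a b → Spec_mixer a b (mixer a b)

-- ===== LEMMAS AND PROOFS =====

-- canonical interleave of the common prefix
def inter2 : List Int → List Int → List Int
  | x :: xs, y :: ys => x :: y :: inter2 xs ys
  | _, _ => []

theorem inter2_nil_left (y : List Int) : inter2 [] y = [] := by cases y <;> rfl
theorem inter2_nil_right (x : List Int) : inter2 x [] = [] := by cases x <;> rfl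

theorem mixerLoopAB_rev (x : List Int) : ∀ (y mixed : List Int),
    mixerLoopAB x.reverse y.reverse mixed =
      ((x.drop (min x.length y.length)).reverse,
       (y.drop (min x.length y.length)).reverse,
       mixed ++ inter2 x y) := by
  induction x with
  | nil =>
    intro y mixed
    rw [mixerLoopAB]
    simp [inter2_nil_left]
  | cons x xs ih =>
    intro y mixed
    cases y with
    | nil =>
      rw [mixerLoopAB]
      simp [inter2_nil_right]
    | cons y ys =>
      rw [mixerLoopAB]
      have hx : (x :: xs).reverse = xs.reverse ++ [x] := by simp
      have hy : (y :: ys).reverse = ys.reverse ++ [y] := by simp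
      have hguard : 0 < (x :: xs).reverse.length ∧ 0 < (y :: ys).reverse.length := by simp
      rw [dif_pos hguard]
      have hgx : (x :: xs).reverse.getLast (List.ne_nil_of_length_pos hguard.1) = x := by
        simp
      have hgy : (y :: ys).reverse.getLast (List.ne_nil_of_length_pos hguard.2) = y := by
        simp
      have hdx : (x :: xs).reverse.dropLast = xs.reverse := by rw [hx]; simp
      have hdy : (y :: ys).reverse.dropLast = ys.reverse := by rw [hy]; simp
      rw [hgx, hgy, hdx, hdy, ih ys (mixed ++ [x, y])]
      simp [inter2, Nat.succ_min_succ]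

theorem mixerDrain_rev (x : List Int) : ∀ (mixed : List Int),
    mixerDrain x.reverse mixed = mixed ++ x := by
  induction x with
  | nil => intro mixed; rw [mixerDrain]; simp
  | cons x xs ih =>
    intro mixed
    rw [mixerDrain]
    have hx : (x :: xs).reverse = xs.reverse ++ [x] := by simp
    have hguard : 0 < (x :: xs).reverse.length := by simp
    rw [dif_pos hguard]
    have hg : (x :: xs).reverse.getLast (List.ne_nil_of_length_pos hguard) = x := by
      simp
    have hd : (x :: xs).reverse.dropLast = xs.reverse := by rw [hx]; simp
    rw [hg, hd, ih (mixed ++ [x])]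
    simp

theorem mixer_eq (a b : List Int) :
    mixer a b = inter2 a.reverse b.reverse
      ++ (a.reverse.drop (min a.reverse.length b.reverse.length))
      ++ (b.reverse.drop (min a.reverse.length b.reverse.length)) := by
  unfold mixer
  show mixerDrain (mixerLoopAB a b []).2.1
        (mixerDrain (mixerLoopAB a b []).1 (mixerLoopAB a b []).2.2) = _
  have h := mixerLoopAB_rev a.reverse b.reverse ([] : List Int)
  simp only [List.reverse_reverse] at h
  rw [h]
  rw [mixerDrain_rev, mixerDrain_rev]
  simp

theorem mixerAltLoop_eq (ra rb : List Int) : ∀ (i : Nat) (mixed : List Int),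
    mixerAltLoop ra rb i mixed =
      (mixed ++ inter2 (ra.drop i) (rb.drop i), max i (min ra.length rb.length)) := by
  intro i
  induction h : ra.length - i using Nat.strong_induction_on generalizing i with
  | _ n ih =>
    intro mixed
    rw [mixerAltLoop]
    by_cases hg : i < ra.length ∧ i < rb.length
    · rw [if_pos hg]
      have h1 : ra.length - (i + 1) < n := by omega
      rw [ih _ h1 (i + 1) rfl]
      have hra : ra.drop i = ra[i] :: ra.drop (i + 1) := List.drop_eq_getElem_cons hg.1
      have hrb : rb.drop i = rb[i] :: rb.drop (i + 1) := List.drop_eq_getElem_cons hg.2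
      have hga : ra.getD i 0 = ra[i] := by simp [List.getD, hg.1]
      have hgb : rb.getD i 0 = rb[i] := by simp [List.getD, hg.2]
      rw [hra, hrb, hga, hgb]
      simp [inter2]
      omega
    · rw [if_neg hg]
      have : min ra.length rb.length ≤ i := by omega
      have hd : inter2 (ra.drop i) (rb.drop i) = [] := by
        rcases Nat.le_total ra.length rb.length with hle | hle
        · have : ra.drop i = [] := List.drop_eq_nil_of_le (by omega)
          rw [this, inter2_nil_left]
        · have : rb.drop i = [] := List.drop_eq_nil_of_le (by omega)
          rw [this, inter2_nil_right]
      rw [hd]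
      simp
      omega

theorem mixer_alt_eq (a b : List Int) :
    mixer_alt a b = inter2 a.reverse b.reverse
      ++ (a.reverse.drop (min a.reverse.length b.reverse.length))
      ++ (b.reverse.drop (min a.reverse.length b.reverse.length)) := by
  unfold mixer_alt
  show (mixerAltLoop a.reverse b.reverse 0 []).1
        ++ a.reverse.drop (mixerAltLoop a.reverse b.reverse 0 []).2
        ++ b.reverse.drop (mixerAltLoop a.reverse b.reverse 0 []).2 = _
  rw [mixerAltLoop_eq]
  simp

-- ===== VERDICT (by name: the statement is the Claim_ definition above) =====
theorem mixer_spec : Claim_equal_mixer := by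
  intro a b _
  unfold Spec_mixer
  rw [mixer_eq, mixer_alt_eq]
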